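-- pv_equiv track=rewrite | github.com/deeana325/programing-excercises | Python intro problems II/17.py | all_combinations
-- ===== SOURCE A (Python) =====
-- def all_combinations(n: int, l: list) -> list:
--     assert n > 0, "n should be greater than 0"
--     if n == 1:
--         return l
--     prev: list = all_combinations(n - 1, l)
--     rez: list = []
--     for i in prev:
--         for j in l:
--             rez.append(i + j)
--     return rez
-- ===== SOURCE B (Python) =====
-- def all_combinations(n: int, l: list) -> list:
--     assert n > 0, "n should be greater than 0"
--     rez = l
--     for _ in range(n - 1):
--         rez = [i + j for i in rez for j in l]
--     return rez
-- ===== Notes on version B (the rewrite author's own statement) =====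
-- stated objective: simpler
-- what changed: Replaces the n-deep recursion with an iterative left-fold: start from l and apply the product step n-1 times in a comprehension, no recursive calls.
import Mathlib
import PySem

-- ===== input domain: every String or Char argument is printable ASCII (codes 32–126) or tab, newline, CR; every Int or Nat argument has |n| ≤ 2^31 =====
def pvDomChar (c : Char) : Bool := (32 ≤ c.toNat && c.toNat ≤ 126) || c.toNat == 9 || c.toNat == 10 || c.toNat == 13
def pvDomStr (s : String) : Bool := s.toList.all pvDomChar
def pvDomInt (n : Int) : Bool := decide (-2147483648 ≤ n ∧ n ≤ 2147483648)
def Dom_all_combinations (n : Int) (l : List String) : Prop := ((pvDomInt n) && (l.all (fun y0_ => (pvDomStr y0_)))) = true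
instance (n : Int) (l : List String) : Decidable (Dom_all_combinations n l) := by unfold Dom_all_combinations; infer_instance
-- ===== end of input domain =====

-- B replaces A's recursion by an iterative left-fold of the product step; return value only.

-- ===== PORT A =====
-- A's recursion, with the (positive) int argument as structural fuel
def allCombRecA : Nat → List String → List String
  | 0, l => l
  | 1, l => l
  | (k+2), l =>
    let prev := allCombRecA (k+1) l
    prev.foldl (fun rez i => l.foldl (fun rez j => rez ++ [i ++ j]) rez) []

def all_combinations (n : Int) (l : List String) : List String :=
  allCombRecA n.toNat l

-- ===== PORT B =====
def all_combinations_alt (n : Int) (l : List String) : List String :=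
  (List.range (n.toNat - 1)).foldl
    (fun rez _ => rez.flatMap (fun i => l.map (fun j => i ++ j))) l

-- ===== PRECONDITION & SPEC =====
-- Pre_ excludes n ≤ 0, where the Python A fails its assert (AssertionError).
def Pre_all_combinations (n : Int) (_l : List String) : Prop := 0 < n
instance (n : Int) (l : List String) : Decidable (Pre_all_combinations n l) := by
  unfold Pre_all_combinations; infer_instance

def pvWitness_all_combinations : Int × List String := (2, ["a", "b"])

def Spec_all_combinations (n : Int) (l : List String) (out : List String) : Prop := out = all_combinations_alt n l
instance (n : Int) (l : List String) (out : List String) : Decidable (Spec_all_combinations n l out) := by unfold Spec_all_combinations; infer_instance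

-- ===== CLAIM (what is proved, stated in full; the proofs are below) =====
def Claim_equal_all_combinations : Prop := ∀ (n : Int) (l : List String), Dom_all_combinations n l → Pre_all_combinations n l → Spec_all_combinations n l (all_combinations n l)

-- ===== LEMMAS AND PROOFS =====
theorem allCombRecA_eq_fold (k : Nat) (l : List String) :
    allCombRecA (k+1) l =
      (List.range k).foldl
        (fun rez _ => rez.flatMap (fun i => l.map (fun j => i ++ j))) l := by
  induction k with
  | zero => rfl
  | succ k ih =>
    rw [List.range_succ, List.foldl_append, ← ih]
    show (allCombRecA (k+1) l).foldl
        (fun rez i => l.foldl (fun rez j => rez ++ [i ++ j]) rez) [] = _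
    simp only [PySem.List.foldl_append_singleton_eq_map,
      PySem.List.foldl_append_eq_flatMap, List.foldl_cons, List.foldl_nil, List.nil_append]

-- ===== VERDICT (by name: the statement is the Claim_ definition above) =====
theorem all_combinations_spec : Claim_equal_all_combinations := by
  intro n l _ hpre
  have hn : n.toNat = (n.toNat - 1) + 1 := by
    have : 0 < n := hpre
    omega
  show all_combinations n l = all_combinations_alt n l
  unfold all_combinations all_combinations_alt
  rw [hn]
  simp only [Nat.add_sub_cancel]
  rw [allCombRecA_eq_fold]
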